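-- pv_equiv track=rewrite | github.com/agamjolly/cats | cats.py | sphinx_swap
-- ===== SOURCE A (Python) =====
-- def sphinx_swap(start, goal, limit):
--     """A diff function for autocorrect that determines how many letters
--     in START need to be substituted to create GOAL, then adds the difference in
--     their lengths.
--     """
--
--     if limit < 0:
--         return 103297846123784012478362109478390124827
--
--     if len(start) == len(goal) == 0:
--    	    return 0
--
--     if len(start) != len(goal):
--    	    if len(start) > len(goal):
--    	        return len(start) - len(goal) + sphinx_swap(start[:len(goal)], goal, limit - len(start) + len(goal))
--    	    else:
--    	        return len(goal) - len(start) + sphinx_swap(start, goal[:len(start)], limit - len(goal) + len(start))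
--
--     if start[0] == goal[0]:
--         return sphinx_swap(start[1:], goal[1:], limit)
--
--     else:
--         return 1 + sphinx_swap(start[1:], goal[1:], limit - 1)
-- ===== SOURCE B (Python) =====
-- def sphinx_swap(start, goal, limit):
--     """Single linear pass: accumulate substitution cost and length difference,
--     decrementing the remaining limit; once the limit goes negative, add the
--     sentinel constant to the cost accumulated so far (exactly A's behaviour)."""
--     BIG = 103297846123784012478362109478390124827
--     if limit < 0:
--         return BIG
--     cost = 0
--     d = abs(len(start) - len(goal))
--     if d:
--         cost += d
--         limit -= d
--         if limit < 0:
--             return cost + BIG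
--     for a, b in zip(start, goal):
--         if a != b:
--             cost += 1
--             limit -= 1
--             if limit < 0:
--                 return cost + BIG
--     return cost
-- ===== Notes on version B (the rewrite author's own statement) =====
-- stated objective: faster
-- what changed: Replaced A's recursion with O(n) string slicing at every step by a single linear pass over zipped characters that tracks accumulated cost and remaining limit, adding the sentinel constant once the limit goes negative.
import Mathlib
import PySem

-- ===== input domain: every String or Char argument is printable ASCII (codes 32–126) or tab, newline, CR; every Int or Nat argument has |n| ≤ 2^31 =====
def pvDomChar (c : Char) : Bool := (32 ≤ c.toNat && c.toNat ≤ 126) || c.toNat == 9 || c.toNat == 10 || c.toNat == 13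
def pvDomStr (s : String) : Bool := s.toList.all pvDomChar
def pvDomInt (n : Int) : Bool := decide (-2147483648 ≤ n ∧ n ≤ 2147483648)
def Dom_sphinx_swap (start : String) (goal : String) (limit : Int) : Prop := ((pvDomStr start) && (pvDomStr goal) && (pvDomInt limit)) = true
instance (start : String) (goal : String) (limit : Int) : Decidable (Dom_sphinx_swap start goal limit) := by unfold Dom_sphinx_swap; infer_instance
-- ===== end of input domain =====

-- B replaces A's recursion with quadratic slicing by one linear pass over the zipped
-- characters that tracks accumulated cost and remaining limit (objective: faster).

-- ===== PORT A =====
-- literal transliteration of A's recursion over the characters (strings as char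
-- lists; the slices start[:len(goal)] / start[1:] with nonnegative in-range bounds
-- are exactly List.take / tail)
def sphinxAux (s : List Char) (g : List Char) (limit : Int) : Int :=
  if limit < 0 then 103297846123784012478362109478390124827
  else if s.length = 0 ∧ g.length = 0 then 0
  else if s.length ≠ g.length then
    if s.length > g.length then
      ((s.length : Int) - g.length) + sphinxAux (s.take g.length) g (limit - s.length + g.length)
    else
      ((g.length : Int) - s.length) + sphinxAux s (g.take s.length) (limit - g.length + s.length)
  else
    match s, g with
    | c :: s', d :: g' =>
      if c = d then sphinxAux s' g' limit
      else 1 + sphinxAux s' g' (limit - 1)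
    | _, _ => 0  -- unreachable: lengths equal and not both zero
termination_by s.length + g.length
decreasing_by
  · simp only [List.length_take]; omega
  · simp only [List.length_take]; omega
  · simp_all; omega
  · simp_all; omega

def sphinx_swap (start : String) (goal : String) (limit : Int) : Int :=
  sphinxAux start.toList goal.toList limit

-- ===== PORT B =====
-- the for-loop of Source B over zip(start, goal) with state (cost, limit)
def sphinxLoop (l : List (Char × Char)) (cost : Int) (lim : Int) : Int :=
  match l with
  | [] => cost
  | (a, b) :: rest =>
    if a ≠ b then
      if lim - 1 < 0 then cost + 1 + 103297846123784012478362109478390124827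
      else sphinxLoop rest (cost + 1) (lim - 1)
    else sphinxLoop rest cost lim

def sphinx_swap_alt (start : String) (goal : String) (limit : Int) : Int :=
  if limit < 0 then 103297846123784012478362109478390124827
  else
    let s := start.toList
    let g := goal.toList
    let d : Int := |(s.length : Int) - g.length|
    if d ≠ 0 then
      if limit - d < 0 then d + 103297846123784012478362109478390124827
      else sphinxLoop (s.zip g) d (limit - d)
    else sphinxLoop (s.zip g) 0 limit

-- ===== PRECONDITION & SPEC =====
def Spec_sphinx_swap (start : String) (goal : String) (limit : Int) (out : Int) : Prop := out = sphinx_swap_alt start goal limit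
instance (start : String) (goal : String) (limit : Int) (out : Int) : Decidable (Spec_sphinx_swap start goal limit out) := by unfold Spec_sphinx_swap; infer_instance

-- ===== CLAIM (what is proved, stated in full; the proofs are below) =====
def Claim_equal_sphinx_swap : Prop := ∀ (start : String) (goal : String) (limit : Int), Dom_sphinx_swap start goal limit → Spec_sphinx_swap start goal limit (sphinx_swap start goal limit)

-- ===== LEMMAS AND PROOFS =====

theorem sphinxAux_neg (s g : List Char) (lim : Int) (h : lim < 0) :
    sphinxAux s g lim = 103297846123784012478362109478390124827 := by
  conv_lhs => rw [sphinxAux.eq_def]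
  rw [if_pos h]

theorem sphinxAux_cons (a b : Char) (s' g' : List Char) (lim : Int)
    (h : s'.length = g'.length) (hl : ¬ lim < 0) :
    sphinxAux (a :: s') (b :: g') lim
      = if a = b then sphinxAux s' g' lim else 1 + sphinxAux s' g' (lim - 1) := by
  conv_lhs => rw [sphinxAux.eq_def]
  rw [if_neg hl, if_neg (by simp : ¬ ((a :: s').length = 0 ∧ (b :: g').length = 0)),
    if_neg (by simp [h] : ¬ (a :: s').length ≠ (b :: g').length)]

theorem sphinxAux_longer (s g : List Char) (lim : Int)
    (h : s.length > g.length) (hl : ¬ lim < 0) :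
    sphinxAux s g lim
      = ((s.length : Int) - g.length) + sphinxAux (s.take g.length) g (lim - s.length + g.length) := by
  conv_lhs => rw [sphinxAux.eq_def]
  rw [if_neg hl, if_neg (by omega : ¬ (s.length = 0 ∧ g.length = 0)),
    if_pos (by omega : s.length ≠ g.length), if_pos h]

theorem sphinxAux_shorter (s g : List Char) (lim : Int)
    (h : s.length < g.length) (hl : ¬ lim < 0) :
    sphinxAux s g lim
      = ((g.length : Int) - s.length) + sphinxAux s (g.take s.length) (lim - g.length + s.length) := by
  conv_lhs => rw [sphinxAux.eq_def]
  rw [if_neg hl, if_neg (by omega : ¬ (s.length = 0 ∧ g.length = 0)),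
    if_pos (by omega : s.length ≠ g.length), if_neg (by omega : ¬ s.length > g.length)]

theorem sphinxLoop_acc (l : List (Char × Char)) (c lim : Int) :
    sphinxLoop l c lim = c + sphinxLoop l 0 lim := by
  induction l generalizing c lim with
  | nil => simp [sphinxLoop]
  | cons p rest ih =>
    obtain ⟨a, b⟩ := p
    simp only [sphinxLoop]
    split_ifs with h1 h2
    · ring
    · rw [ih (c + 1), ih (0 + 1)]; ring
    · exact ih c lim

-- zipping ignores the part of the longer list beyond the other's length
theorem zip_take_left (s g : List Char) : (s.take g.length).zip g = s.zip g := by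
  induction s generalizing g with
  | nil => simp
  | cons a s' ih =>
    cases g with
    | nil => simp
    | cons b g' => simp [List.zip_cons_cons, ih]

theorem zip_take_right (s g : List Char) : s.zip (g.take s.length) = s.zip g := by
  induction s generalizing g with
  | nil => simp
  | cons a s' ih =>
    cases g with
    | nil => simp
    | cons b g' => simp [List.zip_cons_cons, ih]

-- on equal-length inputs with a nonnegative budget, A's recursion is B's loop
theorem sphinxAux_eq_loop (s g : List Char) (lim : Int)
    (hlen : s.length = g.length) (hlim : 0 ≤ lim) :
    sphinxAux s g lim = sphinxLoop (s.zip g) 0 lim := by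
  induction s generalizing g lim with
  | nil =>
    cases g with
    | nil => simp [sphinxAux, sphinxLoop, not_lt.mpr hlim]
    | cons b g' => simp at hlen
  | cons a s' ih =>
    cases g with
    | nil => simp at hlen
    | cons b g' =>
      simp only [List.length_cons] at hlen
      have hlen' : s'.length = g'.length := by omega
      have hnotlt : ¬ lim < 0 := not_lt.mpr hlim
      rw [sphinxAux_cons a b s' g' lim hlen' hnotlt]
      simp only [List.zip_cons_cons, sphinxLoop]
      by_cases hab : a = b
      · rw [if_pos hab, if_neg (by simpa using hab)]
        exact ih g' lim hlen' hlim
      · rw [if_neg hab, if_pos (by simpa using hab)]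
        by_cases hl : lim - 1 < 0
        · rw [if_pos hl, sphinxAux_neg s' g' (lim - 1) hl]; ring
        · rw [if_neg hl, ih g' (lim - 1) hlen' (by omega), sphinxLoop_acc _ (0 + 1)]
          ring

theorem sphinxAux_eq_alt (st gl : String) (lim : Int) :
    sphinxAux st.toList gl.toList lim = sphinx_swap_alt st gl lim := by
  by_cases hlim : lim < 0
  · rw [sphinxAux_neg _ _ lim hlim]
    simp [sphinx_swap_alt, hlim]
  · rw [not_lt] at hlim
    have hnotlt : ¬ lim < 0 := not_lt.mpr hlim
    simp only [sphinx_swap_alt, if_neg hnotlt]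
    set s := st.toList with hs
    set g := gl.toList with hg
    by_cases hlen : s.length = g.length
    · have hd : |(s.length : Int) - g.length| = 0 := by simp [hlen]
      rw [if_neg (by simp [hd])]
      exact sphinxAux_eq_loop s g lim hlen hlim
    · rcases lt_or_gt_of_ne (fun h => hlen h) with hlt | hgt
      · -- s shorter: g gets truncated
        have hd : |(s.length : Int) - g.length| = (g.length : Int) - s.length := by
          rw [abs_of_nonpos (by push_cast; omega)]; push_cast; ring
        set d : Int := (g.length : Int) - s.length with hdval
        have hdpos : 0 < d := by rw [hdval]; push_cast; omega
        rw [sphinxAux_shorter s g lim hlt hnotlt]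
        have hlim2 : lim - g.length + s.length = lim - d := by rw [hdval]; push_cast; ring
        rw [hd, ← hdval, hlim2, if_pos hdpos.ne']
        by_cases hneg : lim - d < 0
        · rw [sphinxAux_neg _ _ _ hneg, if_pos hneg]
        · rw [if_neg hneg,
            sphinxAux_eq_loop s (g.take s.length) (lim - d) (by simp; omega) (by omega),
            zip_take_right, sphinxLoop_acc _ d]
      · -- s longer: s gets truncated
        have hd : |(s.length : Int) - g.length| = (s.length : Int) - g.length := by
          rw [abs_of_nonneg (by push_cast; omega)]
        set d : Int := (s.length : Int) - g.length with hdval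
        have hdpos : 0 < d := by rw [hdval]; push_cast; omega
        rw [sphinxAux_longer s g lim hgt hnotlt]
        have hlim2 : lim - s.length + g.length = lim - d := by rw [hdval]; push_cast; ring
        rw [hd, ← hdval, hlim2, if_pos hdpos.ne']
        by_cases hneg : lim - d < 0
        · rw [sphinxAux_neg _ _ _ hneg, if_pos hneg]
        · rw [if_neg hneg,
            sphinxAux_eq_loop (s.take g.length) g (lim - d) (by simp; omega) (by omega),
            zip_take_left, sphinxLoop_acc _ d]

-- ===== VERDICT (by name: the statement is the Claim_ definition above) =====
theorem sphinx_swap_spec : Claim_equal_sphinx_swap := by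
  intro start goal limit _
  unfold Spec_sphinx_swap sphinx_swap
  exact sphinxAux_eq_alt start goal limit
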